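-- pv_equiv track=rewrite | github.com/nrudzis/Capstone_1 | db_update.py | validate_first_to_third_list
-- ===== SOURCE A (Python) =====
-- def validate_first_to_third_list(q_eps_list):
--     """Returns False if there's more than two ()s, or if there's not three items after each (), each of which is also not (), otherwise returns True."""
--
--     #if there are more than two ()s, return False
--     if q_eps_list.count(()) > 2:
--         return False
--
--     #if there are not three items after each (), or if any of the three is also a (), return False
--     for i, q_eps in enumerate(q_eps_list):
--         if q_eps_list[i] == ():
--             if len(q_eps_list) < i+4:
--                 return False
--             else:
--                 if q_eps_list[i+1] == () or q_eps_list[i+2] == () or q_eps_list[i+3] == ():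
--                     return False
--     return True
-- ===== SOURCE B (Python) =====
-- def validate_first_to_third_list(q_eps_list):
--     """Returns False if there's more than two ()s, or if there's not three items after each (), each of which is also not (), otherwise returns True."""
--     n = len(q_eps_list)
--     empties = [i for i, q_eps in enumerate(q_eps_list) if q_eps == ()]
--     if len(empties) > 2:
--         return False
--     for k, i in enumerate(empties):
--         if i + 3 >= n:
--             return False
--         if k + 1 < len(empties) and empties[k + 1] <= i + 3:
--             return False
--     return True
-- ===== Notes on version B (the rewrite author's own statement) =====
-- stated objective: alternative
-- what changed: B collects the indices of empty tuples in one scan and validates via bounds and the gap to the next empty index in that sorted index list, instead of re-counting and inspecting the three neighbouring elements at each empty position.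
import Mathlib
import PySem

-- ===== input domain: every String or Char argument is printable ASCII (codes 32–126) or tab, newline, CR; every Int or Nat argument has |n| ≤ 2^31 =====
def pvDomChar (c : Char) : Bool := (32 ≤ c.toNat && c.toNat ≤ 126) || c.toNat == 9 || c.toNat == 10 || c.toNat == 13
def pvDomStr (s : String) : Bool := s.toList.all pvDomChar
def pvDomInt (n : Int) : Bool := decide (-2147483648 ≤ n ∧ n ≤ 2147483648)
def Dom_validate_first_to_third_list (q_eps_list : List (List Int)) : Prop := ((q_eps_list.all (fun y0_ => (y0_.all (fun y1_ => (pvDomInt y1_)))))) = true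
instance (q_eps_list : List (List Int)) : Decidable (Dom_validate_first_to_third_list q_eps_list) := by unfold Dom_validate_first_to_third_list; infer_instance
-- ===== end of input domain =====

-- B rewrite: one scan collects the indices of empty tuples; validation then reasons about
-- bounds and the gap to the NEXT empty index instead of re-inspecting the three neighbour
-- elements (objective: alternative decomposition; same asymptotic cost).

-- ===== PORT A =====
-- A's for-loop with early returns: structural recursion over list(enumerate(q_eps_list)).
def pvALoop (q : List (List Int)) : List (Int × List Int) → Bool
  | [] => true
  | (i, _) :: rest =>
    if PySem.List.pyGet? q i == some ([] : List Int) then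
      if (q.length : Int) < i + 4 then false
      else if PySem.List.pyGet? q (i+1) == some ([] : List Int)
            || PySem.List.pyGet? q (i+2) == some ([] : List Int)
            || PySem.List.pyGet? q (i+3) == some ([] : List Int) then false
      else pvALoop q rest
    else pvALoop q rest

def validate_first_to_third_list (q_eps_list : List (List Int)) : Bool :=
  if PySem.List.count q_eps_list ([] : List Int) > 2 then false
  else pvALoop q_eps_list (PySem.List.enumerate q_eps_list 0)

-- ===== PORT B =====
-- the comprehension [i for i, q_eps in enumerate(q_eps_list) if q_eps == ()]
def pvEmpties (q : List (List Int)) : List Int :=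
  (PySem.List.enumerate q 0).filterMap (fun p => if p.2 == ([] : List Int) then some p.1 else none)

-- Source B's loop over the empty indices; 'empties[k+1]' is the lookahead at the head of rest.
def pvBLoop (n : Int) : List Int → Bool
  | [] => true
  | i :: rest =>
    if i + 3 ≥ n then false
    else
      match rest with
      | j :: _ => if j ≤ i + 3 then false else pvBLoop n rest
      | [] => pvBLoop n rest

def validate_first_to_third_list_alt (q_eps_list : List (List Int)) : Bool :=
  if (pvEmpties q_eps_list).length > 2 then false
  else pvBLoop (q_eps_list.length : Int) (pvEmpties q_eps_list)

-- ===== PRECONDITION & SPEC =====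
def Spec_validate_first_to_third_list (q_eps_list : List (List Int)) (out : Bool) : Prop := out = validate_first_to_third_list_alt q_eps_list
instance (q_eps_list : List (List Int)) (out : Bool) : Decidable (Spec_validate_first_to_third_list q_eps_list out) := by unfold Spec_validate_first_to_third_list; infer_instance

-- ===== CLAIM (what is proved, stated in full; the proofs are below) =====
def Claim_equal_validate_first_to_third_list : Prop := ∀ (q_eps_list : List (List Int)), Dom_validate_first_to_third_list q_eps_list → Spec_validate_first_to_third_list q_eps_list (validate_first_to_third_list q_eps_list)

-- ===== LEMMAS AND PROOFS =====

-- A's per-index check, as a pure predicate (the loop is its List.all).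
def pvACheck (q : List (List Int)) (i : Int) : Bool :=
  if PySem.List.pyGet? q i == some ([] : List Int) then
    if (q.length : Int) < i + 4 then false
    else !(PySem.List.pyGet? q (i+1) == some ([] : List Int)
         || PySem.List.pyGet? q (i+2) == some ([] : List Int)
         || PySem.List.pyGet? q (i+3) == some ([] : List Int))
  else true

theorem pvAll_congr_mem {α : Type} {l : List α} {f g : α → Bool}
    (h : ∀ x ∈ l, f x = g x) : l.all f = l.all g := by
  rw [List.all_eq_not_any_not, List.all_eq_not_any_not,
    PySem.List.any_congr_mem (g := fun x => !g x) (by intro x hx; rw [h x hx])]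

theorem pvALoop_eq_all (q : List (List Int)) (l : List (Int × List Int)) :
    pvALoop q l = l.all (fun p => pvACheck q p.1) := by
  induction l with
  | nil => rfl
  | cons p rest ih =>
    obtain ⟨i, x⟩ := p
    rw [List.all_cons, ← ih]
    show pvALoop q ((i, x) :: rest) = (pvACheck q i && pvALoop q rest)
    simp only [pvALoop, pvACheck]
    split_ifs with h1 h2 h3
    · simp
    · rw [h3]; simp
    · rw [Bool.eq_false_iff.mpr h3]; simp
    · simp

-- membership in the empties list
theorem mem_pvEmpties (q : List (List Int)) (j : Int) :
    j ∈ pvEmpties q ↔ 0 ≤ j ∧ j < (q.length : Int) ∧ PySem.List.pyGet? q j = some ([] : List Int) := by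
  simp only [pvEmpties, List.mem_filterMap]
  constructor
  · rintro ⟨⟨i, x⟩, hmem, hif⟩
    rw [PySem.List.mem_enumerate_iff] at hmem
    obtain ⟨k, hk, hpk⟩ := hmem
    simp only [Prod.mk.injEq, zero_add] at hpk
    obtain ⟨hi, hx⟩ := hpk
    by_cases hxe : x = ([] : List Int)
    · simp only [hxe, beq_self_eq_true, if_true, Option.some.injEq] at hif
      subst hif; subst hi
      refine ⟨by positivity, by exact_mod_cast hk, ?_⟩
      rw [PySem.List.pyGet?_natCast, List.getElem?_eq_getElem hk, ← hx, hxe]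
    · simp [hxe] at hif
  · rintro ⟨h0, hn, hget⟩
    refine ⟨(j, ([] : List Int)), ?_, by simp⟩
    rw [PySem.List.mem_enumerate_iff]
    refine ⟨j.toNat, by omega, ?_⟩
    rw [PySem.List.pyGet?_of_nonneg q h0] at hget
    have hlt : j.toNat < q.length := by omega
    rw [List.getElem?_eq_getElem hlt, Option.some.injEq] at hget
    rw [Prod.mk.injEq]
    exact ⟨by omega, hget.symm⟩

theorem pairwise_pvEmpties (q : List (List Int)) :
    (pvEmpties q).Pairwise (· < ·) := by
  have h := PySem.List.pairwise_lt_enumerate (xs := q) (s := 0)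
  unfold pvEmpties
  apply List.Pairwise.filterMap _ ?_ h
  intro a b c d hab
  split_ifs at hab ⊢ with h1 h2 h3 <;> simp_all

theorem length_pvEmpties (q : List (List Int)) :
    (pvEmpties q).length = PySem.List.count q ([] : List Int) := by
  rw [PySem.List.count_eq, List.count_eq_countP]
  unfold pvEmpties
  rw [List.length_filterMap_eq_countP]
  have h1 : (PySem.List.enumerate q 0).countP
      (fun a => ((fun p => if p.2 == ([] : List Int) then some p.1 else none) a).isSome)
      = (PySem.List.enumerate q 0).countP (fun p => p.2 == ([] : List Int)) := by
    apply List.countP_congr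
    intro p _
    by_cases h : p.2 == ([] : List Int) <;> simp [h]
  rw [h1, show (fun p : Int × List Int => p.2 == ([] : List Int))
      = (fun x : List Int => x == ([] : List Int)) ∘ Prod.snd from rfl,
    ← List.countP_map, PySem.List.map_snd_enumerate]

-- the key lemma: A's all-scan over the empty indices equals B's gap scan,
-- for any sorted list l that contains EXACTLY the empty indices ≥ lb.
theorem loop_eq (q : List (List Int)) (l : List Int) (lb : Int)
    (hiff : ∀ j : Int, j ∈ l ↔ (lb ≤ j ∧ 0 ≤ j ∧ j < (q.length : Int) ∧ PySem.List.pyGet? q j = some ([] : List Int)))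
    (hs : l.Pairwise (· < ·)) :
    l.all (fun i => pvACheck q i) = pvBLoop (q.length : Int) l := by
  induction l generalizing lb with
  | nil => rfl
  | cons i rest ih =>
    have hi := (hiff i).mp (List.mem_cons_self)
    obtain ⟨hlb, h0, hn, hget⟩ := hi
    have hrest_gt : ∀ x ∈ rest, i < x := fun x hx => (List.pairwise_cons.mp hs).1 x hx
    have hs' := (List.pairwise_cons.mp hs).2
    -- the tail contains exactly the empty indices ≥ i+1
    have hiff' : ∀ j : Int, j ∈ rest ↔ (i + 1 ≤ j ∧ 0 ≤ j ∧ j < (q.length : Int) ∧ PySem.List.pyGet? q j = some ([] : List Int)) := by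
      intro j
      constructor
      · intro hj
        have := (hiff j).mp (List.mem_cons_of_mem _ hj)
        exact ⟨by have := hrest_gt j hj; omega, this.2⟩
      · rintro ⟨hj1, hj2, hj3, hj4⟩
        have hj : j ∈ i :: rest := (hiff j).mpr ⟨by omega, hj2, hj3, hj4⟩
        rcases List.mem_cons.mp hj with h | h
        · omega
        · exact h
    rw [List.all_cons]
    by_cases h4 : (q.length : Int) < i + 4
    · have hge : i + 3 ≥ (q.length : Int) := by omega
      simp [pvACheck, pvBLoop, hget, h4, hge]
    · have hge : ¬ (i + 3 ≥ (q.length : Int)) := by omega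
      -- membership of i+k in rest ↔ q[i+k] is empty, for k = 1,2,3
      have hmemk : ∀ k : Int, 1 ≤ k → k ≤ 3 →
          ((PySem.List.pyGet? q (i+k) = some ([] : List Int)) ↔ (i+k) ∈ rest) := by
        intro k hk1 hk3
        rw [hiff' (i+k)]
        constructor
        · intro h; exact ⟨by omega, by omega, by omega, h⟩
        · intro h; exact h.2.2.2
      by_cases hb : PySem.List.pyGet? q (i+1) == some ([] : List Int)
            || PySem.List.pyGet? q (i+2) == some ([] : List Int)
            || PySem.List.pyGet? q (i+3) == some ([] : List Int)
      · -- some neighbour is empty ⇒ it is in rest ⇒ the next empty index is ≤ i+3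
        have hex : ∃ k : Int, 1 ≤ k ∧ k ≤ 3 ∧ (i+k) ∈ rest := by
          simp only [Bool.or_eq_true, beq_iff_eq] at hb
          rcases hb with (h | h) | h
          · exact ⟨1, by omega, by omega, (hmemk 1 (by omega) (by omega)).mp h⟩
          · exact ⟨2, by omega, by omega, (hmemk 2 (by omega) (by omega)).mp h⟩
          · exact ⟨3, by omega, by omega, (hmemk 3 (by omega) (by omega)).mp h⟩
        obtain ⟨k, hk1, hk3, hkmem⟩ := hex
        obtain ⟨j, rest', rfl⟩ : ∃ j rest', rest = j :: rest' := by
          cases rest with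
          | nil => simp at hkmem
          | cons a b => exact ⟨a, b, rfl⟩
        have hj_le : j ≤ i + 3 := by
          rcases List.mem_cons.mp hkmem with h | h
          · omega
          · have := (List.pairwise_cons.mp hs').1 _ h; omega
        simp [pvACheck, pvBLoop, hget, h4, hb, hge, hj_le]
      · -- no neighbour is empty ⇒ the next empty index (if any) is > i+3; recurse
        have hhd : pvACheck q i = true := by
          simp [pvACheck, hget, h4, hb]
        rw [hhd, Bool.true_and, ih (i+1) hiff' hs']
        cases rest with
        | nil => simp [pvBLoop, hge]
        | cons j rest' =>
          have hj_gt : ¬ (j ≤ i + 3) := by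
            intro hj
            have hjmem : j ∈ j :: rest' := List.mem_cons_self
            have hj1 : i + 1 ≤ j := by have := hrest_gt j hjmem; omega
            obtain ⟨k, hk1, hk3, rfl⟩ :
                ∃ k : Int, 1 ≤ k ∧ k ≤ 3 ∧ j = i + k := ⟨j - i, by omega, by omega, by omega⟩
            have := (hmemk k hk1 hk3).mpr hjmem
            simp only [Bool.or_eq_true, beq_iff_eq, not_or] at hb
            obtain ⟨⟨hb1, hb2⟩, hb3⟩ := hb
            rcases (by omega : k = 1 ∨ k = 2 ∨ k = 3) with rfl | rfl | rfl
            · exact hb1 this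
            · exact hb2 this
            · exact hb3 this
          simp [pvBLoop, hge, hj_gt]

-- A's all over enumerate ignores the non-empty positions: it equals B's all over the empties.
theorem all_enumerate_eq_all_empties (q : List (List Int)) :
    ((PySem.List.enumerate q 0).all fun p => pvACheck q p.1)
      = (pvEmpties q).all (fun i => pvACheck q i) := by
  have hfm : ∀ (l : List (Int × List Int)),
      (l.filterMap (fun p => if p.2 == ([] : List Int) then some p.1 else none)).all
          (fun i => pvACheck q i)
        = l.all (fun p => if p.2 == ([] : List Int) then pvACheck q p.1 else true) := by
    intro l
    induction l with
    | nil => rfl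
    | cons p rest ih =>
      by_cases h : p.2 == ([] : List Int)
      · rw [List.filterMap_cons_some (by rw [if_pos h]), List.all_cons, List.all_cons,
          if_pos h, ih]
      · rw [List.filterMap_cons_none (by rw [if_neg h]), List.all_cons, if_neg h, ih,
          Bool.true_and]
  unfold pvEmpties
  rw [hfm]
  apply pvAll_congr_mem
  intro p hp
  by_cases h : p.2 == ([] : List Int)
  · simp [h]
  · rw [PySem.List.mem_enumerate_iff] at hp
    obtain ⟨k, hk, rfl⟩ := hp
    simp [pvACheck, List.getElem?_eq_getElem hk, h]

-- ===== VERDICT (by name: the statement is the Claim_ definition above) =====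
theorem validate_first_to_third_list_spec : Claim_equal_validate_first_to_third_list := by
  intro q _
  unfold Spec_validate_first_to_third_list
  unfold validate_first_to_third_list validate_first_to_third_list_alt
  rw [length_pvEmpties]
  by_cases hc : PySem.List.count q ([] : List Int) > 2
  · rw [if_pos hc, if_pos hc]
  · rw [if_neg hc, if_neg hc, pvALoop_eq_all, all_enumerate_eq_all_empties]
    exact loop_eq q (pvEmpties q) 0
      (fun j => by rw [mem_pvEmpties]; tauto)
      (pairwise_pvEmpties q)
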